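-- pv_equiv track=rewrite | github.com/dmollaaliod/gibbslda | gibbs.py | compute_CDT
-- ===== SOURCE A (Python) =====
-- def compute_CDT(this_sample):
--     """return the CDT.
--        CDT[doc][topic] = number of times 'topic' is assigned to a word in 'doc'.
--     >>> this_sample = [[['bank', 1], ['money', 0], ['money', 1], ['bank', 1], ['loan', 0]],
--     ...   [['stream', 1], ['loan', 0], ['river', 1], ['loan', 0], ['money', 1]],
--     ...   [['money', 1], ['river', 0], ['bank', 0], ['stream', 1], ['bank', 0]],
--     ...   [['bank', 1], ['stream', 1], ['bank', 0], ['bank', 1], ['river', 1]]]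
--     >>> CDT = compute_CDT(this_sample)
--     >>> CDT == [[2,3],[2,3],[3,2],[1,4]]
--     True
--     """
--     CDT = []
--     d_i = -1
--     for d in this_sample:
--         d_i += 1
--         CDT.append([])
--         for t in range(2):
--             cdt = compute_cdt(d_i,t,this_sample)
--             CDT[d_i].append(cdt)
--     return CDT
--
-- def compute_cdt(doc,topic,this_sample):
--     """Return the number of times the topic is assigned to a word in the document:
--     >>> this_sample = [[['bank', 1], ['money', 0], ['money', 1], ['bank', 1], ['loan', 0]],
--     ...   [['stream', 1], ['loan', 0], ['river', 1], ['loan', 0], ['money', 1]],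
--     ...   [['money', 1], ['river', 0], ['bank', 0], ['stream', 1], ['bank', 0]],
--     ...   [['bank', 1], ['stream', 1], ['bank', 0], ['bank', 1], ['river', 1]]]
--     >>> compute_cdt(1,0,this_sample)
--     2
--     >>> compute_cdt(1,1,this_sample)
--     3
--     """
--     count = 0
--     for w in this_sample[doc]:
--         if w[1] == topic:
--             count += 1
--     return count
-- ===== SOURCE B (Python) =====
-- def compute_CDT(this_sample):
--     CDT = []
--     for d in this_sample:
--         c0 = 0
--         c1 = 0
--         for w in d:
--             if w[1] == 0:
--                 c0 += 1
--             elif w[1] == 1: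
--                 c1 += 1
--         CDT.append([c0, c1])
--     return CDT
-- ===== Notes on version B (the rewrite author's own statement) =====
-- stated objective: simpler
-- what changed: Replaces A's per-topic rescans via an index-based helper (two full passes over each document, looked up through this_sample[d_i]) with one direct pass per document that maintains two accumulators c0/c1.
import Mathlib
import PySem

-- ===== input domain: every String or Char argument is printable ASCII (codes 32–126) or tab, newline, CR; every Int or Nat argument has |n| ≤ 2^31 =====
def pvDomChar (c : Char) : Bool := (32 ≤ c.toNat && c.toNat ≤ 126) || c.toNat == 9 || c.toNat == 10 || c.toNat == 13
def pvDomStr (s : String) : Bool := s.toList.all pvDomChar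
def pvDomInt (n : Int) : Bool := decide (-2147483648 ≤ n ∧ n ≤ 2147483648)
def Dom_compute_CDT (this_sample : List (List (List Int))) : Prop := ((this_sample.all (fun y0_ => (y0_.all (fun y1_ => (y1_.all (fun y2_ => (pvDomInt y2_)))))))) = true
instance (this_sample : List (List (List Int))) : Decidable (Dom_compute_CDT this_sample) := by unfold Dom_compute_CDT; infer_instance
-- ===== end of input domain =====

-- B replaces A's two per-topic rescans of each document (through an index-based
-- helper) with a single direct pass per document keeping two accumulators (simpler).


-- ===== PORT A =====
-- helper compute_cdt of A; w[1] is in range for every input admitted by Pre_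
def compute_cdt_A (doc topic : Int) (this_sample : List (List (List Int))) : Int :=
  ((PySem.List.pyGet? this_sample doc).getD []).foldl
    (fun count w => if (PySem.List.pyGet? w 1).getD 0 = topic then count + 1 else count) 0

def compute_CDT (this_sample : List (List (List Int))) : List (List Int) :=
  (this_sample.foldl
    (fun (st : List (List Int) × Int) _d =>
      let d_i := st.2 + 1
      -- CDT.append([]) then for t in range(2): CDT[d_i].append(compute_cdt(d_i,t,this_sample))
      let row := (PySem.List.pyRange 0 2 1).foldl
        (fun r t => r ++ [compute_cdt_A d_i t this_sample]) []
      (st.1 ++ [row], d_i))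
    ([], -1)).1

-- ===== PORT B =====
def compute_CDT_alt (this_sample : List (List (List Int))) : List (List Int) :=
  this_sample.foldl
    (fun CDT d =>
      let p := d.foldl
        (fun (c : Int × Int) w =>
          let t := (PySem.List.pyGet? w 1).getD 0
          if t = 0 then (c.1 + 1, c.2)
          else if t = 1 then (c.1, c.2 + 1)
          else c)
        (0, 0)
      CDT ++ [[p.1, p.2]])
    []

-- ===== PRECONDITION & SPEC =====
-- Pre_ excludes inputs containing a word entry of length < 2: there Python A's w[1]
-- raises IndexError (and B raises the same way).
def Pre_compute_CDT (this_sample : List (List (List Int))) : Prop :=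
  ∀ d ∈ this_sample, ∀ w ∈ d, 2 ≤ w.length
instance (this_sample : List (List (List Int))) : Decidable (Pre_compute_CDT this_sample) := by unfold Pre_compute_CDT; infer_instance
def pvWitness_compute_CDT : List (List (List Int)) := [[[7, 1], [8, 0], [9, 1]], [], [[5, 2]]]

def Spec_compute_CDT (this_sample : List (List (List Int))) (out : List (List Int)) : Prop := out = compute_CDT_alt this_sample
instance (this_sample : List (List (List Int))) (out : List (List Int)) : Decidable (Spec_compute_CDT this_sample out) := by unfold Spec_compute_CDT; infer_instance

-- ===== CLAIM (what is proved, stated in full; the proofs are below) =====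
def Claim_equal_compute_CDT : Prop := ∀ (this_sample : List (List (List Int))), Dom_compute_CDT this_sample → Pre_compute_CDT this_sample → Spec_compute_CDT this_sample (compute_CDT this_sample)

-- ===== LEMMAS AND PROOFS =====

-- number of words in d whose label (w[1], defaulted) equals t
def cntLbl (t : Int) : List (List Int) → Int
  | [] => 0
  | w :: d => (if (PySem.List.pyGet? w 1).getD 0 = t then 1 else 0) + cntLbl t d

theorem cntA_foldl (t : Int) (d : List (List Int)) : ∀ c : Int,
    d.foldl (fun count w => if (PySem.List.pyGet? w 1).getD 0 = t then count + 1 else count) c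
      = c + cntLbl t d := by
  induction d with
  | nil => intro c; simp [cntLbl]
  | cons w d ih =>
    intro c
    simp only [List.foldl_cons, cntLbl, ih]
    split_ifs <;> ring

theorem cntB_foldl (d : List (List Int)) : ∀ c0 c1 : Int,
    d.foldl
      (fun (c : Int × Int) w =>
        let t := (PySem.List.pyGet? w 1).getD 0
        if t = 0 then (c.1 + 1, c.2)
        else if t = 1 then (c.1, c.2 + 1)
        else c)
      (c0, c1)
      = (c0 + cntLbl 0 d, c1 + cntLbl 1 d) := by
  induction d with
  | nil => intro c0 c1; simp [cntLbl]
  | cons w d ih =>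
    intro c0 c1
    simp only [List.foldl_cons, cntLbl]
    by_cases h0 : (PySem.List.pyGet? w 1).getD 0 = 0
    · simp [h0, ih, add_comm, add_left_comm]
    · by_cases h1 : (PySem.List.pyGet? w 1).getD 0 = 1
      · simp [h1, ih, add_comm, add_left_comm]
      · simp [h0, h1, ih]

theorem row_eq (ts : List (List (List Int))) (pre : List (List (List Int)))
    (d : List (List Int)) (rest : List (List (List Int)))
    (hts : ts = pre ++ d :: rest) :
    (PySem.List.pyRange 0 2 1).foldl
        (fun r t => r ++ [compute_cdt_A (pre.length : Int) t ts]) []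
      = [cntLbl 0 d, cntLbl 1 d] := by
  have hr : PySem.List.pyRange 0 2 1 = [0, 1] := by decide
  have hget : PySem.List.pyGet? ts (pre.length : Int) = some d := by
    subst hts; exact PySem.List.pyGet?_append_length pre rest d
  simp [hr, compute_cdt_A, hget, cntA_foldl]

theorem A_loop (ts : List (List (List Int))) :
    ∀ (rest pre : List (List (List Int))) (acc : List (List Int)),
      ts = pre ++ rest →
      (rest.foldl
        (fun (st : List (List Int) × Int) _d =>
          let d_i := st.2 + 1
          let row := (PySem.List.pyRange 0 2 1).foldl
            (fun r t => r ++ [compute_cdt_A d_i t ts]) []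
          (st.1 ++ [row], d_i))
        (acc, (pre.length : Int) - 1)).1
        = acc ++ rest.map (fun d => [cntLbl 0 d, cntLbl 1 d]) := by
  intro rest
  induction rest with
  | nil => intro pre acc _; simp
  | cons d rest ih =>
    intro pre acc hts
    simp only [List.foldl_cons, List.map_cons]
    have e : (pre.length : Int) - 1 + 1 = (pre.length : Int) := by ring
    rw [e]
    rw [row_eq ts pre d rest hts]
    have h2 : ((pre ++ [d]).length : Int) - 1 = (pre.length : Int) := by simp
    have := ih (pre ++ [d]) (acc ++ [[cntLbl 0 d, cntLbl 1 d]]) (by simp [hts])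
    rw [h2] at this
    rw [this]
    simp

theorem B_eq (ts : List (List (List Int))) :
    compute_CDT_alt ts = ts.map (fun d => [cntLbl 0 d, cntLbl 1 d]) := by
  unfold compute_CDT_alt
  suffices h : ∀ (l : List (List (List Int))) (acc : List (List Int)),
      l.foldl
        (fun CDT d =>
          let p := d.foldl
            (fun (c : Int × Int) w =>
              let t := (PySem.List.pyGet? w 1).getD 0
              if t = 0 then (c.1 + 1, c.2)
              else if t = 1 then (c.1, c.2 + 1)
              else c)
            (0, 0)
          CDT ++ [[p.1, p.2]])
        acc = acc ++ l.map (fun d => [cntLbl 0 d, cntLbl 1 d]) by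
    simpa using h ts []
  intro l
  induction l with
  | nil => intro acc; simp
  | cons d l ih =>
    intro acc
    simp only [List.foldl_cons, List.map_cons]
    rw [cntB_foldl]
    rw [ih]
    simp

-- ===== VERDICT (by name: the statement is the Claim_ definition above) =====
theorem compute_CDT_spec : Claim_equal_compute_CDT := by
  intro ts _ _
  unfold Spec_compute_CDT
  unfold compute_CDT
  rw [show (-1 : Int) = (([] : List (List (List Int))).length : Int) - 1 by simp]
  rw [A_loop ts ts [] [] (by simp)]
  rw [B_eq]
  simp
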